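-- pv_equiv track=rewrite | github.com/pond-nj/slotted-egraphs | chc/product.py | find_top_level
-- ===== SOURCE A (Python) =====
-- def find_top_level(text: str, needle: str) -> int:
--     """Return the index of the first top-level occurrence of `needle`, or -1."""
--     depth = 0
--     in_str = False
--     quote = ""
--     i, n = 0, len(text)
--     nl = len(needle)
--     while i < n:
--         c = text[i]
--         if in_str:
--             if c == "\\" and i + 1 < n:
--                 i += 2
--                 continue
--             if c == quote:
--                 in_str = False
--             i += 1
--             continue
--         if c in ("'", '"'):
--             in_str = True
--             quote = c
--             i += 1
--             continue
--         if c in "([":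
--             depth += 1
--             i += 1
--             continue
--         if c in ")]":
--             depth -= 1
--             i += 1
--             continue
--         if depth == 0 and text[i : i + nl] == needle:
--             return i
--         i += 1
--     return -1
-- ===== SOURCE B (Python) =====
-- def find_top_level(text: str, needle: str) -> int:
--     """Return the index of the first top-level occurrence of `needle`, or -1.
--
--     Two phases: (1) a for-loop state machine (quote = active string quote or
--     None, skip = escaped-char flag) collects the set of top-level indices;
--     (2) occurrences of `needle` are enumerated with str.find and the first
--     one lying in that set is returned."""
--     top = set()
--     depth = 0
--     quote = None
--     skip = False
--     n = len(text)
--     for i, c in enumerate(text):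
--         if skip:
--             skip = False
--         elif quote is not None:
--             if c == "\\" and i + 1 < n:
--                 skip = True
--             elif c == quote:
--                 quote = None
--         elif c in "'\"":
--             quote = c
--         elif c in "([":
--             depth += 1
--         elif c in ")]":
--             depth -= 1
--         elif depth == 0:
--             top.add(i)
--     j = text.find(needle)
--     while j != -1:
--         if j in top:
--             return j
--         j = text.find(needle, j + 1)
--     return -1
-- ===== Notes on version B (the rewrite author's own statement) =====
-- stated objective: faster
-- what changed: A interleaves the bracket/quote state machine with an O(nl) slice comparison at every top-level index; B runs a for-loop state machine once to collect the set of top-level indices and then enumerates occurrences of the needle with str.find (linear-time C substring search), returning the first occurrence in that set.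
import Mathlib
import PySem

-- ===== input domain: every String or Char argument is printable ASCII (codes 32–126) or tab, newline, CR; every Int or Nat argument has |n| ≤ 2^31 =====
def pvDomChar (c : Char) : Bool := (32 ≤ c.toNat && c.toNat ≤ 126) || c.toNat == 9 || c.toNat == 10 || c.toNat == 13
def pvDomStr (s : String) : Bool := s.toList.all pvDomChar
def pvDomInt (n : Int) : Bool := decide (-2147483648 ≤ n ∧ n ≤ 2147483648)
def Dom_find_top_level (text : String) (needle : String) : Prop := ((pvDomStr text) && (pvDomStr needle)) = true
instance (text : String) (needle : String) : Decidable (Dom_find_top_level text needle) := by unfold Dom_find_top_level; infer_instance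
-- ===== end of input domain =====

-- B replaces A's interleaved scan-and-slice-compare (O(n*nl)) by two phases: one state-machine pass
-- collecting the set of top-level indices, then enumerating occurrences of the needle with str.find
-- and returning the first occurrence in that set (measurably faster; same result).


-- ===== PORT A =====
-- A's while-loop over index i, transliterated as recursion on the remaining suffix rem = text[i:]
-- (so the slice check text[i:i+nl] == needle is rem.take nl = needle, exact); `quote` starts as a
-- dummy ' ' standing for Python's "": it is only ever compared while in_str is true, and it is
-- always set on entering a string.
def goA (needle : List Char) (nl : Nat) : List Char → Bool → Char → Int → Int → Int
  | [], _, _, _, _ => -1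
  | c :: rest, inStr, quote, depth, i =>
    if inStr then
      if c = '\\' ∧ rest ≠ [] then goA needle nl rest.tail true quote depth (i + 2)
      else if c = quote then goA needle nl rest false quote depth (i + 1)
      else goA needle nl rest true quote depth (i + 1)
    else if c = '\'' ∨ c = '"' then goA needle nl rest true c depth (i + 1)
    else if c = '(' ∨ c = '[' then goA needle nl rest inStr quote (depth + 1) (i + 1)
    else if c = ')' ∨ c = ']' then goA needle nl rest inStr quote (depth - 1) (i + 1)
    else if depth = 0 ∧ List.take nl (c :: rest) = needle then i
    else goA needle nl rest inStr quote depth (i + 1)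
  termination_by rem => rem.length
  decreasing_by all_goals simp; try omega

def find_top_level (text : String) (needle : String) : Int :=
  goA needle.toList needle.toList.length text.toList false ' ' 0 0

-- ===== PORT B =====
-- phase 1 of Source B: for-loop state machine (quote = active quote or none, skip = escaped-char flag)
-- collecting the set `top` of top-level indices; recursion on the suffix, i the current index
def goMask : List Char → Option Char → Bool → Int → Int → PySem.Set Int → PySem.Set Int
  | [], _, _, _, _, top => top
  | c :: rest, quote, skip, depth, i, top =>
    if skip then goMask rest quote false depth (i + 1) top
    else match quote with
      | some q =>
        if c = '\\' ∧ rest ≠ [] then goMask rest (some q) true depth (i + 1) top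
        else if c = q then goMask rest none false depth (i + 1) top
        else goMask rest (some q) false depth (i + 1) top
      | none =>
        if c = '\'' ∨ c = '"' then goMask rest (some c) false depth (i + 1) top
        else if c = '(' ∨ c = '[' then goMask rest none false (depth + 1) (i + 1) top
        else if c = ')' ∨ c = ']' then goMask rest none false (depth - 1) (i + 1) top
        else goMask rest none false depth (i + 1) (if depth = 0 then PySem.Set.add top i else top)

-- phase 2 of Source B: `j = text.find(needle); while j != -1: … ; j = text.find(needle, j + 1)`;
-- `fuel` only bounds the iteration count for totality (each step strictly increases j ≤ len text).
def loopB (cs nd : List Char) (top : PySem.Set Int) : Nat → Int → Int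
  | 0, _ => -1
  | fuel + 1, j =>
    if j = -1 then -1
    else if j ∈ top then j
    else loopB cs nd top fuel (PySem.Chars.findFrom cs nd (j + 1) none)

def find_top_level_alt (text : String) (needle : String) : Int :=
  let cs := text.toList
  let top := goMask cs none false 0 0 PySem.Set.empty
  loopB cs needle.toList top (cs.length + 2) (PySem.Chars.find cs needle.toList)

-- ===== PRECONDITION & SPEC =====
def Spec_find_top_level (text : String) (needle : String) (out : Int) : Prop := out = find_top_level_alt text needle
instance (text : String) (needle : String) (out : Int) : Decidable (Spec_find_top_level text needle out) := by unfold Spec_find_top_level; infer_instance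

-- ===== CLAIM (what is proved, stated in full; the proofs are below) =====
def Claim_equal_find_top_level : Prop := ∀ (text : String) (needle : String), Dom_find_top_level text needle → Spec_find_top_level text needle (find_top_level text needle)

-- ===== LEMMAS AND PROOFS =====

-- pure (non-accumulator) version of B's phase-1 mask, for reasoning
def maskP : List Char → Bool → Char → Int → Int → List Int
  | [], _, _, _, _ => []
  | c :: rest, inStr, quote, depth, i =>
    if inStr then
      if c = '\\' ∧ rest ≠ [] then maskP rest.tail true quote depth (i + 2)
      else if c = quote then maskP rest false quote depth (i + 1)
      else maskP rest true quote depth (i + 1)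
    else if c = '\'' ∨ c = '"' then maskP rest true c depth (i + 1)
    else if c = '(' ∨ c = '[' then maskP rest inStr quote (depth + 1) (i + 1)
    else if c = ')' ∨ c = ']' then maskP rest inStr quote (depth - 1) (i + 1)
    else if depth = 0 then i :: maskP rest inStr quote depth (i + 1)
    else maskP rest inStr quote depth (i + 1)
  termination_by rem => rem.length
  decreasing_by all_goals simp; try omega

theorem mask_bounds : ∀ (rem : List Char) (s : Bool) (q : Char) (d i : Int),
    ∀ x ∈ maskP rem s q d i, i ≤ x ∧ x < i + rem.length := by
  intro rem s q d i
  induction rem, s, q, d, i using maskP.induct with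
  | case1 => simp [maskP]
  | case2 c rest quote depth i h ih =>
    intro x hx; rw [maskP] at hx; simp [h] at hx
    have h' := ih x hx
    simp only [List.length_cons, List.length_tail] at h' ⊢; omega
  | case3 rest quote depth i h ih =>
    intro x hx; rw [maskP] at hx; simp [h] at hx
    have h' := ih x hx
    simp only [List.length_cons] at h' ⊢; omega
  | case4 c rest quote depth i h1 h2 ih =>
    have h1' : ¬(c = '\\' ∧ ¬rest = []) := by simpa using h1
    intro x hx; rw [maskP] at hx; simp [h1', h2] at hx
    have h' := ih x hx
    simp only [List.length_cons] at h' ⊢; omega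
  | case5 c rest inStr quote depth i h1 h2 ih =>
    rw [Bool.not_eq_true] at h1; subst h1
    intro x hx; rw [maskP] at hx; simp [h2] at hx
    have h' := ih x hx
    simp only [List.length_cons] at h' ⊢; omega
  | case6 c rest inStr quote depth i h1 h2 h3 ih =>
    rw [Bool.not_eq_true] at h1; subst h1
    intro x hx; rw [maskP] at hx; simp [h2, h3] at hx
    have h' := ih x hx
    simp only [List.length_cons] at h' ⊢; omega
  | case7 c rest inStr quote depth i h1 h2 h3 h4 ih =>
    rw [Bool.not_eq_true] at h1; subst h1
    intro x hx; rw [maskP] at hx; simp [h2, h3, h4] at hx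
    have h' := ih x hx
    simp only [List.length_cons] at h' ⊢; omega
  | case8 c rest inStr quote i h1 h2 h3 h4 ih =>
    rw [Bool.not_eq_true] at h1; subst h1
    intro x hx; rw [maskP] at hx; simp [h2, h3, h4] at hx
    rcases hx with h | hx
    · subst h; simp only [List.length_cons]; omega
    · have h' := ih x hx
      simp only [List.length_cons] at h' ⊢; omega
  | case9 c rest inStr quote depth i h1 h2 h3 h4 h5 ih =>
    rw [Bool.not_eq_true] at h1; subst h1
    intro x hx; rw [maskP] at hx; simp [h2, h3, h4, h5] at hx
    have h' := ih x hx
    simp only [List.length_cons] at h' ⊢; omega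

theorem mask_sorted : ∀ (rem : List Char) (s : Bool) (q : Char) (d i : Int),
    (maskP rem s q d i).Pairwise (· < ·) := by
  intro rem s q d i
  induction rem, s, q, d, i using maskP.induct with
  | case1 => simp [maskP]
  | case2 c rest quote depth i h ih => rw [maskP]; simp [h]; exact ih
  | case3 rest quote depth i h ih => rw [maskP]; simp [h]; exact ih
  | case4 c rest quote depth i h1 h2 ih =>
    have h1' : ¬(c = '\\' ∧ ¬rest = []) := by simpa using h1
    rw [maskP]; simp [h1', h2]; exact ih
  | case5 c rest inStr quote depth i h1 h2 ih =>
    rw [Bool.not_eq_true] at h1; subst h1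
    rw [maskP]; simp [h2]; exact ih
  | case6 c rest inStr quote depth i h1 h2 h3 ih =>
    rw [Bool.not_eq_true] at h1; subst h1
    rw [maskP]; simp [h2, h3]; exact ih
  | case7 c rest inStr quote depth i h1 h2 h3 h4 ih =>
    rw [Bool.not_eq_true] at h1; subst h1
    rw [maskP]; simp [h2, h3, h4]; exact ih
  | case8 c rest inStr quote i h1 h2 h3 h4 ih =>
    rw [Bool.not_eq_true] at h1; subst h1
    rw [maskP]; simp [h2, h3, h4]
    refine ⟨?_, ih⟩
    intro x hx
    have := (mask_bounds rest false quote 0 (i + 1) x hx).1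
    omega
  | case9 c rest inStr quote depth i h1 h2 h3 h4 h5 ih =>
    rw [Bool.not_eq_true] at h1; subst h1
    rw [maskP]; simp [h2, h3, h4, h5]; exact ih

theorem goMask_eq : ∀ (rem : List Char) (s : Bool) (q : Char) (d i : Int)
    (top : PySem.Set Int), (∀ x ∈ top, x < i) →
    goMask rem (if s then some q else none) false d i top = top ++ maskP rem s q d i := by
  intro rem s q d i top
  induction rem, s, q, d, i using maskP.induct generalizing top with
  | case1 => intro _; simp [maskP, goMask]
  | case2 c rest quote depth i h ih =>
    intro ht
    rw [maskP]; simp only [if_true, if_pos h]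
    rw [goMask.eq_def]
    simp only [Bool.false_eq_true, if_false, if_pos h]
    rcases rest with _ | ⟨r, t⟩
    · exact absurd h.2 (by simp)
    · rw [goMask.eq_def]
      simp only [List.tail_cons]
      have h2 : i + 1 + 1 = i + 2 := by omega
      rw [h2]
      exact ih top (fun x hx => by have := ht x hx; omega)
  | case3 rest quote depth i h ih =>
    intro ht; rw [maskP, goMask.eq_def]; simp [h]
    exact ih top (fun x hx => by have := ht x hx; omega)
  | case4 c rest quote depth i h1 h2 ih =>
    have h1' : ¬(c = '\\' ∧ ¬rest = []) := by simpa using h1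
    intro ht; rw [maskP, goMask.eq_def]; simp [h1', h2]
    exact ih top (fun x hx => by have := ht x hx; omega)
  | case5 c rest inStr quote depth i h1 h2 ih =>
    rw [Bool.not_eq_true] at h1; subst h1
    intro ht; rw [maskP, goMask.eq_def]; simp [h2]
    have := ih top (fun x hx => by have := ht x hx; omega)
    simpa using this
  | case6 c rest inStr quote depth i h1 h2 h3 ih =>
    rw [Bool.not_eq_true] at h1; subst h1
    intro ht; rw [maskP, goMask.eq_def]; simp [h2, h3]
    have := ih top (fun x hx => by have := ht x hx; omega)
    simpa using this
  | case7 c rest inStr quote depth i h1 h2 h3 h4 ih =>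
    rw [Bool.not_eq_true] at h1; subst h1
    intro ht; rw [maskP, goMask.eq_def]; simp [h2, h3, h4]
    have := ih top (fun x hx => by have := ht x hx; omega)
    simpa using this
  | case8 c rest inStr quote i h1 h2 h3 h4 ih =>
    rw [Bool.not_eq_true] at h1; subst h1
    intro ht; rw [maskP, goMask.eq_def]; simp [h2, h3, h4]
    have hnot : i ∉ top := fun hm => by have := ht i hm; omega
    rw [PySem.Set.add_of_not_mem hnot]
    have := ih (top ++ [i]) (fun x hx => by
      rcases List.mem_append.mp hx with hx | hx
      · have := ht x hx; omega
      · simp at hx; omega)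
    simp at this
    simp [this]
  | case9 c rest inStr quote depth i h1 h2 h3 h4 h5 ih =>
    rw [Bool.not_eq_true] at h1; subst h1
    intro ht; rw [maskP, goMask.eq_def]; simp [h2, h3, h4, h5]
    have := ih top (fun x hx => by have := ht x hx; omega)
    simpa using this

theorem drop_succ_of_eq {cs rem : List Char} {c : Char} {i : Int} (hi : 0 ≤ i)
    (h : (c :: rem) = cs.drop i.toNat) : rem = cs.drop (i + 1).toNat := by
  have h2 : (i + 1).toNat = i.toNat + 1 := by omega
  rw [h2, ← List.drop_drop]
  rw [← h]
  simp

-- A on the suffix text[i:] returns the first element of the mask where the needle matches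
theorem goA_eq (cs nd : List Char) : ∀ (rem : List Char) (s : Bool) (q : Char) (d i : Int),
    0 ≤ i → rem = cs.drop i.toNat →
    goA nd nd.length rem s q d i =
      (match (maskP rem s q d i).find? (fun j => nd.isPrefixOf (cs.drop j.toNat)) with
       | some j => j | none => -1) := by
  intro rem s q d i
  induction rem, s, q, d, i using maskP.induct with
  | case1 => intro _ _; simp [maskP, goA]
  | case2 c rest quote depth i h ih =>
    intro hi hr
    rw [maskP, goA]; simp [h]
    refine ih (by omega) ?_
    have h2 : rest = cs.drop (i + 1).toNat := drop_succ_of_eq hi hr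
    have h3 : rest.tail = cs.drop (i + 1 + 1).toNat := by
      rcases h with ⟨_, hne⟩
      match rest, hne with
      | d :: t, _ => exact drop_succ_of_eq (by omega) h2
    have : i + 1 + 1 = i + 2 := by omega
    rwa [this] at h3
  | case3 rest quote depth i h ih =>
    intro hi hr
    rw [maskP, goA]; simp [h]
    exact ih (by omega) (drop_succ_of_eq hi hr)
  | case4 c rest quote depth i h1 h2 ih =>
    have h1' : ¬(c = '\\' ∧ ¬rest = []) := by simpa using h1
    intro hi hr
    rw [maskP, goA]; simp [h1', h2]
    exact ih (by omega) (drop_succ_of_eq hi hr)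
  | case5 c rest inStr quote depth i h1 h2 ih =>
    rw [Bool.not_eq_true] at h1; subst h1
    intro hi hr
    rw [maskP, goA]; simp [h2]
    exact ih (by omega) (drop_succ_of_eq hi hr)
  | case6 c rest inStr quote depth i h1 h2 h3 ih =>
    rw [Bool.not_eq_true] at h1; subst h1
    intro hi hr
    rw [maskP, goA]; simp [h2, h3]
    exact ih (by omega) (drop_succ_of_eq hi hr)
  | case7 c rest inStr quote depth i h1 h2 h3 h4 ih =>
    rw [Bool.not_eq_true] at h1; subst h1
    intro hi hr
    rw [maskP, goA]; simp [h2, h3, h4]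
    exact ih (by omega) (drop_succ_of_eq hi hr)
  | case8 c rest inStr quote i h1 h2 h3 h4 ih =>
    rw [Bool.not_eq_true] at h1; subst h1
    intro hi hr
    rw [maskP, goA]; simp [h2, h3, h4]
    by_cases hm : List.take nd.length (c :: rest) = nd
    · have hpre : nd.isPrefixOf (cs.drop i.toNat) = true := by
        rw [← hr]
        exact List.isPrefixOf_iff_prefix.mpr (List.prefix_iff_eq_take.mpr hm.symm)
      simp [hm, hpre]
    · have hpre : nd.isPrefixOf (cs.drop i.toNat) = false := by
        rw [← hr]
        rw [Bool.eq_false_iff]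
        intro hc
        exact hm (List.prefix_iff_eq_take.mp (List.isPrefixOf_iff_prefix.mp hc)).symm
      simp [hm, hpre]
      exact ih (by omega) (drop_succ_of_eq hi hr)
  | case9 c rest inStr quote depth i h1 h2 h3 h4 h5 ih =>
    rw [Bool.not_eq_true] at h1; subst h1
    intro hi hr
    rw [maskP, goA]; simp [h2, h3, h4, h5]
    exact ih (by omega) (drop_succ_of_eq hi hr)

theorem findFrom_past (cs sub : List Char) (k : Int) (h : (cs.length : Int) < k) :
    PySem.Chars.findFrom cs sub k none = -1 := by
  simp only [PySem.Chars.findFrom]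
  have hk : ¬ k < 0 := by omega
  simp [hk]
  omega

theorem findFrom_le_len (cs sub : List Char) (k : Nat) :
    PySem.Chars.findFrom cs sub (k : Int) none ≤ (cs.length : Int) := by
  simp only [PySem.Chars.findFrom]
  have hk : ¬ (k : Int) < 0 := by omega
  simp [hk]
  split
  · omega
  · split
    · omega
    · have h1 := PySem.Chars.find_le_length (List.drop (k:Int).toNat (List.take (cs.length:Int).toNat cs)) sub
      simp at h1 ⊢
      omega

theorem find?_sorted_first {l : List Int} {p : Int → Bool} {j : Int}
    (hs : l.Pairwise (· < ·)) (hj : j ∈ l) (hpj : p j = true)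
    (hlt : ∀ x ∈ l, x < j → p x = false) :
    l.find? p = some j := by
  induction l with
  | nil => simp at hj
  | cons a t ih =>
    rcases List.mem_cons.mp hj with rfl | hjt
    · simp [hpj]
    · have haj : a < j := (List.pairwise_cons.mp hs).1 j hjt
      have hpa : p a = false := hlt a (List.mem_cons_self) haj
      simp [hpa]
      exact ih (List.pairwise_cons.mp hs).2 hjt (fun x hx hxj => hlt x (List.mem_cons_of_mem _ hx) hxj)

theorem find?_congr_mem {α : Type} {p q : α → Bool} : ∀ {l : List α}, (∀ x ∈ l, p x = q x) → l.find? p = l.find? q := by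
  intro l
  induction l with
  | nil => intro _; rfl
  | cons a t ih =>
    intro h
    have ha := h a List.mem_cons_self
    by_cases hp : p a = true
    · simp [hp, ha ▸ hp]
    · simp only [Bool.not_eq_true] at hp
      rw [List.find?_cons, List.find?_cons, hp, ← ha, hp]
      exact ih (fun x hx => h x (List.mem_cons_of_mem _ hx))

theorem pre_drop_infix {nd cs : List Char} {m : Nat} (h : nd <+: cs.drop m) : nd <:+: cs :=
  h.isInfix.trans (List.drop_suffix m cs).isInfix

-- B's find-loop started at position k returns the first mask element ≥ k where the needle matches
theorem loop_eq (cs nd : List Char) (top : List Int)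
    (hb : ∀ x ∈ top, 0 ≤ x ∧ x < (cs.length : Int))
    (hs : top.Pairwise (· < ·)) :
    ∀ (fuel k : Nat), cs.length + 1 - k ≤ fuel →
    loopB cs nd top fuel (PySem.Chars.findFrom cs nd (k : Int) none) =
      (match top.find? (fun j => (k : Int) ≤ j && nd.isPrefixOf (cs.drop j.toNat)) with
       | some j => j | none => -1) := by
  intro fuel
  induction fuel with
  | zero =>
    intro k hk
    have hkn : cs.length < k := by omega
    have hnone : top.find? (fun j => (k : Int) ≤ j && nd.isPrefixOf (cs.drop j.toNat)) = none := by
      rw [List.find?_eq_none]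
      intro x hx
      have := hb x hx
      have : ¬ ((k : Int) ≤ x) := by omega
      simp [this]
    simp [loopB, hnone]
  | succ fuel ih =>
    intro k hk
    by_cases hkn : k ≤ cs.length
    · by_cases hj : PySem.Chars.findFrom cs nd (k : Int) none = -1
      · have hni : ¬ nd <:+: List.drop k cs :=
          (PySem.Chars.findFrom_natCast_eq_neg_one_iff cs nd k hkn).mp hj
        have hnone : top.find? (fun j => (k : Int) ≤ j && nd.isPrefixOf (cs.drop j.toNat)) = none := by
          rw [List.find?_eq_none]
          intro x hx
          have hbx := hb x hx
          by_cases hkx : (k : Int) ≤ x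
          · have hpf : nd.isPrefixOf (cs.drop x.toNat) = false := by
              rw [Bool.eq_false_iff]
              intro hc
              have hpre := List.isPrefixOf_iff_prefix.mp hc
              have hd : cs.drop x.toNat = (cs.drop k).drop (x.toNat - k) := by
                rw [List.drop_drop]
                congr 1
                omega
              rw [hd] at hpre
              exact hni (pre_drop_infix hpre)
            simp [hpf]
          · simp [hkx]
        rw [hj]
        simp [loopB, hnone]
      · obtain ⟨hkj, hpre, hmin⟩ := PySem.Chars.findFrom_natCast_spec cs nd k hkn hj
        have hj0 : 0 ≤ PySem.Chars.findFrom cs nd (k : Int) none := by omega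
        set j := PySem.Chars.findFrom cs nd (k : Int) none with hjdef
        have hjn : j ≤ (cs.length : Int) := findFrom_le_len cs nd k
        by_cases hmem : j ∈ top
        · rw [loopB]
          simp only [hj, if_false, hmem, if_pos]
          rw [find?_sorted_first hs hmem ?_ ?_]
          · simp [hkj, List.isPrefixOf_iff_prefix.mpr hpre]
          · intro x hx hxj
            have hbx := hb x hx
            by_cases hkx : (k : Int) ≤ x
            · have hxm : x.toNat < j.toNat := by omega
              have hxk : k ≤ x.toNat := by omega
              have := hmin x.toNat hxk hxm
              have hpf : nd.isPrefixOf (cs.drop x.toNat) = false := by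
                rw [Bool.eq_false_iff]
                intro hc
                exact this (List.isPrefixOf_iff_prefix.mp hc)
              simp [hpf]
            · simp [hkx]
        · rw [loopB]
          simp only [hj, if_false, hmem]
          have hcast : j + 1 = ((j.toNat + 1 : Nat) : Int) := by omega
          rw [hcast, ih (j.toNat + 1) (by omega)]
          have : top.find? (fun x => (k : Int) ≤ x && nd.isPrefixOf (cs.drop x.toNat)) =
              top.find? (fun x => ((j.toNat + 1 : Nat) : Int) ≤ x && nd.isPrefixOf (cs.drop x.toNat)) := by
            apply find?_congr_mem
            intro x hx
            have hbx := hb x hx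
            by_cases hpf : nd.isPrefixOf (cs.drop x.toNat) = true
            · have hxj : x ≠ j := fun h => hmem (h ▸ hx)
              by_cases hge : ((j.toNat + 1 : Nat) : Int) ≤ x
              · have : (k : Int) ≤ x := by omega
                simp [hpf, this]; omega
              · have hxlt : x.toNat < j.toNat ∨ x.toNat = j.toNat ∨ x < k := by omega
                have hkx : ¬ ((k:Int) ≤ x) := by
                  rcases hxlt with h1 | h1 | h1
                  · intro hkx
                    exact (Bool.eq_false_iff.mp (by
                      rw [Bool.eq_false_iff]
                      intro hc
                      exact hmin x.toNat (by omega) h1 (List.isPrefixOf_iff_prefix.mp hc))) hpf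
                  · exact absurd (by omega : x = j) hxj
                  · omega
                simp [hkx]; omega
            · simp only [Bool.not_eq_true] at hpf
              simp [hpf]
          rw [this]
    · have hj : PySem.Chars.findFrom cs nd (k : Int) none = -1 :=
        findFrom_past cs nd k (by omega)
      have hnone : top.find? (fun j => (k : Int) ≤ j && nd.isPrefixOf (cs.drop j.toNat)) = none := by
        rw [List.find?_eq_none]
        intro x hx
        have := hb x hx
        have : ¬ ((k : Int) ≤ x) := by omega
        simp [this]
      rw [hj]
      simp [loopB, hnone]

-- ===== VERDICT (by name: the statement is the Claim_ definition above) =====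
theorem find_top_level_spec : Claim_equal_find_top_level := by
  intro text needle _
  unfold Spec_find_top_level find_top_level find_top_level_alt
  simp only []
  have hmask : goMask text.toList none false 0 0 PySem.Set.empty =
      maskP text.toList false ' ' 0 0 := by
    have := goMask_eq text.toList false ' ' 0 0 PySem.Set.empty (by intro x hx; simp [PySem.Set.empty] at hx)
    simpa [PySem.Set.empty] using this
  rw [hmask]
  rw [goA_eq text.toList needle.toList text.toList false ' ' 0 0 (by omega) (by simp)]
  rw [← PySem.Chars.findFrom_zero text.toList needle.toList]
  have hl := loop_eq text.toList needle.toList (maskP text.toList false ' ' 0 0)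
    (fun x hx => by have := mask_bounds text.toList false ' ' 0 0 x hx; omega)
    (mask_sorted text.toList false ' ' 0 0) (text.toList.length + 2) 0 (by omega)
  rw [Nat.cast_zero] at hl
  rw [hl]
  congr 1
  apply find?_congr_mem
  intro x hx
  have := (mask_bounds text.toList false ' ' 0 0 x hx).1
  simp [this]
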